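-- pv_equiv track=rewrite | github.com/calvinator42000/AoC | 2023/07_day/1_pt/main.py | groupByScore
-- ===== SOURCE A (Python) =====
-- def groupByScore(hand_list_scored):
--     score_group_list = []
--     curr_score = hand_list_scored[0][1]
--     curr_group = [hand_list_scored[0]]
--     for i in range(1, len(hand_list_scored)):
--         if hand_list_scored[i][1] != curr_score:
--             score_group_list.append(curr_group)
--             curr_group = []
--             curr_score = hand_list_scored[i][1]
--         curr_group.append(hand_list_scored[i])
--     score_group_list.append(curr_group)
--     return score_group_list
-- ===== SOURCE B (Python) =====
-- def groupByScore(hand_list_scored):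
--     n = len(hand_list_scored)
--     cuts = [i for i in range(n)
--             if i == 0 or hand_list_scored[i][1] != hand_list_scored[i - 1][1]]
--     return [hand_list_scored[a:b] for a, b in zip(cuts, cuts[1:] + [n])]
-- ===== Notes on version B (the rewrite author's own statement) =====
-- stated objective: alternative
-- what changed: Replaces A's one-pass curr_score/curr_group state machine with a staged two-pass algorithm: first compute the boundary indices where the score changes, then slice the input between consecutive boundaries.
import Mathlib
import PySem

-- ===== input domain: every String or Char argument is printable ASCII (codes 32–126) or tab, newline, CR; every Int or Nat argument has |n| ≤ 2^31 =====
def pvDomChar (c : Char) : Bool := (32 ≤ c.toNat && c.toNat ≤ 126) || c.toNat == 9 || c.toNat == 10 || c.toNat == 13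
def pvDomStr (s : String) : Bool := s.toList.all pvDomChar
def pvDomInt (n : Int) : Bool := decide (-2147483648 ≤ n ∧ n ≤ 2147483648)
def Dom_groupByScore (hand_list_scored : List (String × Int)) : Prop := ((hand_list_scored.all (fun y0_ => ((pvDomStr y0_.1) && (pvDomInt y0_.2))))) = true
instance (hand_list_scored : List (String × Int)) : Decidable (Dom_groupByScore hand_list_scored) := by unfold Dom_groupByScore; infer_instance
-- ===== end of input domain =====

-- B replaces A's one-pass curr_score/curr_group state machine with a staged two-pass
-- algorithm: compute the boundary indices where the score changes, then slice between
-- consecutive boundaries; on [] A raises IndexError, B returns [].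

-- ===== PORT A =====
-- the loop body of A: state = (score_group_list, curr_score, curr_group)
def gbsStep (st : List (List (String × Int)) × Int × List (String × Int))
    (h : String × Int) : List (List (String × Int)) × Int × List (String × Int) :=
  let (sgl, cs, cg) := st
  if h.2 ≠ cs then (sgl ++ [cg], h.2, [h]) else (sgl, cs, cg ++ [h])

def groupByScore (hand_list_scored : List (String × Int)) : List (List (String × Int)) :=
  match hand_list_scored with
  | [] => []   -- unreachable: Python raises IndexError here (excluded by Pre_)
  | x0 :: _ =>
    -- curr_score = xs[0][1]; curr_group = [xs[0]]; for i in range(1, len(xs)): …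
    let init : List (List (String × Int)) × Int × List (String × Int) := ([], x0.2, [x0])
    let fin :=
      (PySem.List.pyRange 1 (PySem.List.len hand_list_scored) 1).foldl
        (fun st i => gbsStep st (PySem.List.pyGetD hand_list_scored i ("", 0))) init
    fin.1 ++ [fin.2.2]

-- ===== PORT B =====
-- cuts = [i for i in range(n) if i == 0 or xs[i][1] != xs[i-1][1]]
def gbCuts (xs : List (String × Int)) : List Int :=
  (PySem.List.pyRange 0 (PySem.List.len xs) 1).filter
    (fun i => i == 0 ||
      !((PySem.List.pyGetD xs i ("", 0)).2 == (PySem.List.pyGetD xs (i - 1) ("", 0)).2))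

-- return [xs[a:b] for a, b in zip(cuts, cuts[1:] + [n])]
def groupByScore_alt (hand_list_scored : List (String × Int)) : List (List (String × Int)) :=
  let cuts := gbCuts hand_list_scored
  (cuts.zip (cuts.tail ++ [PySem.List.len hand_list_scored])).map
    (fun ab => PySem.List.slice hand_list_scored (some ab.1) (some ab.2))

-- ===== PRECONDITION & SPEC =====
-- Pre_ excludes exactly the empty list, on which Python A raises IndexError.
def Pre_groupByScore (hand_list_scored : List (String × Int)) : Prop :=
  hand_list_scored ≠ []
instance (hand_list_scored : List (String × Int)) : Decidable (Pre_groupByScore hand_list_scored) := by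
  unfold Pre_groupByScore; infer_instance

def pvWitness_groupByScore : (List (String × Int)) := [("AA", 3), ("BB", 3), ("CC", 1)]

def Spec_groupByScore (hand_list_scored : List (String × Int)) (out : List (List (String × Int))) : Prop := out = groupByScore_alt hand_list_scored
instance (hand_list_scored : List (String × Int)) (out : List (List (String × Int))) : Decidable (Spec_groupByScore hand_list_scored out) := by unfold Spec_groupByScore; infer_instance

-- ===== CLAIM (what is proved, stated in full; the proofs are below) =====
def Claim_equal_groupByScore : Prop := ∀ (hand_list_scored : List (String × Int)), Dom_groupByScore hand_list_scored → Pre_groupByScore hand_list_scored → Spec_groupByScore hand_list_scored (groupByScore hand_list_scored)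

-- ===== LEMMAS AND PROOFS =====

-- the list of maximal runs of equal score: the common characterisation both ports are proved equal to
def gbRuns : List (String × Int) → List (List (String × Int))
  | [] => []
  | x :: rest =>
    (x :: rest.takeWhile (fun y => y.2 == x.2)) ::
      gbRuns (rest.dropWhile (fun y => y.2 == x.2))
termination_by xs => xs.length
decreasing_by
  simp only [List.length_cons]
  exact Nat.lt_succ_of_le (List.length_dropWhile_le _ _)

@[simp] lemma gbRuns_nil : gbRuns [] = [] := by
  rw [gbRuns]

lemma gbRuns_cons (x : String × Int) (rest : List (String × Int)) :
    gbRuns (x :: rest) =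
      (x :: rest.takeWhile (fun y => y.2 == x.2)) ::
        gbRuns (rest.dropWhile (fun y => y.2 == x.2)) := by
  rw [gbRuns]

-- ---- A = gbRuns ----

-- A's loop written as structural recursion over the tail (what the foldl computes).
lemma gbsFold_eq_loop (t : List (String × Int))
    (sgl : List (List (String × Int))) (cs : Int) (cg : List (String × Int)) :
    (t.foldl gbsStep (sgl, cs, cg)).1 ++ [(t.foldl gbsStep (sgl, cs, cg)).2.2] =
      sgl ++ (cg ++ t.takeWhile (fun y => y.2 == cs)) ::
        gbRuns (t.dropWhile (fun y => y.2 == cs)) := by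
  induction t generalizing sgl cs cg with
  | nil => simp
  | cons h t ih =>
    by_cases hc : h.2 = cs
    · simp [List.foldl_cons, gbsStep, hc, ih, List.append_assoc]
    · have hb : (fun y : String × Int => y.2 == cs) h = false := by simp [hc]
      simp [List.foldl_cons, gbsStep, hc, ih, hb, gbRuns_cons]

lemma groupByScore_eq_runs (xs : List (String × Int)) (h : xs ≠ []) :
    groupByScore xs = gbRuns xs := by
  match xs, h with
  | x0 :: t, _ =>
    unfold groupByScore
    simp only
    rw [show (PySem.List.len (x0 :: t)) = ((x0 :: t).length : Int) from PySem.List.len_eq _,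
      PySem.List.foldl_pyRange_pyGetD' (x0 :: t) ("", 0) gbsStep ([], x0.2, [x0]) (by norm_num)]
    simp only [Int.toNat_one, List.drop_succ_cons, List.drop_zero]
    rw [gbsFold_eq_loop, gbRuns_cons]
    simp

-- ---- B = gbRuns ----

-- Nat-level boundary predicate and cut list
def cutP (xs : List (String × Int)) (k : Nat) : Bool :=
  k == 0 || !((xs.getD k ("", 0)).2 == (xs.getD (k - 1) ("", 0)).2)

def cutsN (xs : List (String × Int)) : List Nat :=
  (List.range xs.length).filter (cutP xs)

-- the chunks B builds, at the Nat level
def chunksN (xs : List (String × Int)) : List (List (String × Int)) :=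
  ((cutsN xs).zip ((cutsN xs).tail ++ [xs.length])).map
    (fun ab => (xs.drop ab.1).take (ab.2 - ab.1))

lemma gbCuts_eq_map_cutsN (xs : List (String × Int)) :
    gbCuts xs = (cutsN xs).map (fun k : Nat => (k : Int)) := by
  unfold gbCuts cutsN
  rw [show (PySem.List.len xs) = (xs.length : Int) from PySem.List.len_eq _,
    PySem.List.pyRange_zero_natCast, List.filter_map]
  refine congrArg (List.map (fun k : Nat => (k : Int))) (List.filter_congr ?_)
  intro k _
  cases k with
  | zero => simp [cutP]
  | succ m =>
    have h1 : ((m + 1 : Nat) : Int) - 1 = ((m : Nat) : Int) := by push_cast; ring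
    simp only [Function.comp_apply, cutP, h1, PySem.List.pyGetD_natCast]
    rw [show m + 1 - 1 = m from rfl]
    simp
    intro hcon
    exfalso
    omega

lemma groupByScore_alt_eq_chunksN (xs : List (String × Int)) :
    groupByScore_alt xs = chunksN xs := by
  unfold groupByScore_alt chunksN
  simp only
  rw [gbCuts_eq_map_cutsN,
    show (PySem.List.len xs) = (xs.length : Int) from PySem.List.len_eq _]
  have htail : ((cutsN xs).map (fun k : Nat => (k : Int))).tail ++ [(xs.length : Int)] =
      ((cutsN xs).tail ++ [xs.length]).map (fun k : Nat => (k : Int)) := by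
    cases cutsN xs <;> simp
  rw [htail, List.zip_map, List.map_map]
  apply List.map_congr_left
  intro ab _
  simp [PySem.List.slice_natCast]

-- the cut list of a first run followed by the rest
lemma cutsN_split (x : String × Int) (tw ys : List (String × Int))
    (hrun : ∀ p ∈ tw, p.2 = x.2) (hhead : ∀ y ∈ ys.head?, y.2 ≠ x.2) :
    cutsN ((x :: tw) ++ ys) =
      0 :: (cutsN ys).map (fun j => (tw.length + 1) + j) := by
  have hidx : ∀ j ≤ tw.length, (((x :: tw) ++ ys).getD j ("", 0)).2 = x.2 := by
    intro j hj
    cases j with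
    | zero => simp
    | succ k =>
      have hk : k < tw.length := by omega
      have : ((x :: tw) ++ ys).getD (k + 1) ("", 0) = tw.getD k ("", 0) := by
        rw [List.getD_eq_getElem?_getD, List.getD_eq_getElem?_getD, List.cons_append,
          List.getElem?_cons_succ, List.getElem?_append_left hk]
      rw [this, List.getD_eq_getElem _ _ hk]
      exact hrun _ (List.getElem_mem hk)
  have hpast : ∀ j, ((x :: tw) ++ ys).getD ((tw.length + 1) + j) ("", 0) = ys.getD j ("", 0) := by
    intro j
    rw [List.getD_eq_getElem?_getD, List.getD_eq_getElem?_getD,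
      show (tw.length + 1) + j = (x :: tw).length + j by simp,
      List.getElem?_append_right (by simp)]
    simp
  have hlen : ((x :: tw) ++ ys).length = (tw.length + 1) + ys.length := by
    simp; omega
  rw [cutsN, hlen, List.range_add, List.filter_append]
  have h1 : List.filter (cutP ((x :: tw) ++ ys)) (List.range (tw.length + 1)) = [0] := by
    rw [List.range_succ_eq_map, List.filter_cons_of_pos (by simp [cutP])]
    have h0 : List.filter (cutP ((x :: tw) ++ ys)) (List.map Nat.succ (List.range tw.length)) = [] := by
      rw [List.filter_map, List.filter_eq_nil_iff.mpr, List.map_nil]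
      intro j hj
      have hj' : j < tw.length := List.mem_range.mp hj
      have e1 := hidx (j + 1) (by omega)
      have e2 := hidx j (by omega)
      simp only [Function.comp_apply, cutP, Nat.succ_eq_add_one, Nat.add_sub_cancel]
      rw [e1, e2]
      simp
    rw [h0]
  rw [h1, List.filter_map, cutsN]
  have hpred : ∀ j ∈ List.range ys.length,
      (cutP ((x :: tw) ++ ys) ∘ (fun j => tw.length + 1 + j)) j = cutP ys j := by
    intro j hj
    have hj' : j < ys.length := List.mem_range.mp hj
    cases j with
    | zero =>
      have hys : ys ≠ [] := by intro hcon; rw [hcon] at hj'; simp at hj'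
      have e1 : ((x :: tw) ++ ys).getD (tw.length + 1 + 0) ("", 0) = ys.getD 0 ("", 0) :=
        hpast 0
      have e2 := hidx tw.length le_rfl
      have hy : (ys.getD 0 ("", 0)).2 ≠ x.2 := by
        obtain ⟨y, t', rfl⟩ := List.exists_cons_of_ne_nil hys
        exact hhead y rfl
      simp only [Function.comp_apply, cutP,
        show tw.length + 1 + 0 - 1 = tw.length from by omega, e1, e2]
      rw [List.getD_eq_getElem?_getD] at hy
      simp [hy]
    | succ m =>
      have e1 := hpast (m + 1)
      have e2 := hpast m
      simp only [Function.comp_apply, cutP,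
        show tw.length + 1 + (m + 1) - 1 = tw.length + 1 + m from by omega,
        show m + 1 - 1 = m from by omega, e1, e2]
      simp
  rw [List.filter_congr hpred]
  simp

lemma cutsN_head (y : String × Int) (t' : List (String × Int)) :
    ∃ c, cutsN (y :: t') = 0 :: c := by
  exact ⟨List.filter (cutP (y :: t')) (List.map Nat.succ (List.range t'.length)), by
    rw [cutsN, List.length_cons, List.range_succ_eq_map,
      List.filter_cons_of_pos (by simp [cutP])]⟩

-- the chunk list of a first run followed by the rest
lemma chunksN_split (x : String × Int) (tw ys : List (String × Int))
    (hrun : ∀ p ∈ tw, p.2 = x.2) (hhead : ∀ y ∈ ys.head?, y.2 ≠ x.2) :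
    chunksN ((x :: tw) ++ ys) = (x :: tw) :: chunksN ys := by
  have hcut := cutsN_split x tw ys hrun hhead
  unfold chunksN
  rw [hcut]
  cases ys with
  | nil =>
    rw [show cutsN ([] : List (String × Int)) = [] from rfl]
    simp
  | cons y t' =>
    obtain ⟨c, hc⟩ := cutsN_head y t'
    rw [hc]
    simp only [List.map_cons, List.tail_cons, List.cons_append, List.zip_cons_cons,
      List.map_cons]
    congr 1
    · -- head chunk = x :: tw
      simp only [List.drop_zero, Nat.add_zero, Nat.sub_zero]
      rw [show x :: (tw ++ y :: t') = (x :: tw) ++ (y :: t') from by simp,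
        show tw.length + 1 = (x :: tw).length from by simp, List.take_left]
    · -- tail chunks = chunks of ys, shifted by tw.length + 1
      have hN : (x :: (tw ++ y :: t')).length = (tw.length + 1) + (t'.length + 1) := by
        simp; omega
      rw [hN,
        show ((tw.length + 1) + (t'.length + 1) : Nat) =
          (fun j => tw.length + 1 + j) (t'.length + 1) from rfl,
        show (List.map (fun j => tw.length + 1 + j) c) ++
            [(fun j => tw.length + 1 + j) (t'.length + 1)] =
          List.map (fun j => tw.length + 1 + j) (c ++ [t'.length + 1]) from by simp,
        show ((tw.length + 1 + 0) :: List.map (fun j => tw.length + 1 + j) c) =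
          List.map (fun j => tw.length + 1 + j) (0 :: c) from rfl,
        List.zip_map, List.map_map]
      simp only [List.length_cons]
      apply List.map_congr_left
      intro ab _
      obtain ⟨a, b⟩ := ab
      simp only [Function.comp_apply, Prod.map]
      have hdrop : (x :: (tw ++ y :: t')).drop (tw.length + 1 + a) =
          (y :: t').drop a := by
        rw [show tw.length + 1 + a = (x :: tw).length + a from by simp,
          ← List.drop_drop, ← List.cons_append, List.drop_left]
      rw [hdrop]
      congr 1
      omega

lemma chunksN_eq_runs (xs : List (String × Int)) : chunksN xs = gbRuns xs := by
  induction hn : xs.length using Nat.strong_induction_on generalizing xs with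
  | _ n ih =>
  cases xs with
  | nil => simp [chunksN, cutsN]
  | cons x t =>
    rw [gbRuns_cons]
    have hsplit : x :: t =
        (x :: t.takeWhile (fun y => y.2 == x.2)) ++ t.dropWhile (fun y => y.2 == x.2) := by
      rw [List.cons_append, List.takeWhile_append_dropWhile]
    rw [hsplit, chunksN_split]
    · congr 1
      apply ih (t.dropWhile (fun y => y.2 == x.2)).length _ _ rfl
      have h1 := List.length_dropWhile_le (fun y : String × Int => y.2 == x.2) t
      have h2 : t.length + 1 = n := by simpa using hn
      omega
    · intro p hp
      have := List.mem_takeWhile_imp hp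
      simpa using this
    · intro y hy
      have hne : t.dropWhile (fun y => y.2 == x.2) ≠ [] := by
        intro hcon; rw [hcon] at hy; simp at hy
      have hhd := List.head_dropWhile_not (fun y : String × Int => y.2 == x.2) hne
      rw [List.head?_eq_some_head hne] at hy
      simp only [Option.mem_def, Option.some.injEq] at hy
      rw [hy] at hhd
      simpa using hhd

-- ===== VERDICT (by name: the statement is the Claim_ definition above) =====
theorem groupByScore_spec : Claim_equal_groupByScore := by
  intro xs _ hpre
  unfold Spec_groupByScore
  rw [groupByScore_eq_runs xs hpre, groupByScore_alt_eq_chunksN, chunksN_eq_runs]
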